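-- pv_equiv track=rewrite | github.com/clemencebc1/SAE_CRYPTO | test.py | find_all_keys_from_img
-- ===== SOURCE A (Python) =====
-- def find_all_keys_from_img(bin_img: str, ciphers: list[str]) -> list:
--     keys = {}
--     index = 0
--     k = 1
--     keys["iv"] = bin_img[index:len(ciphers[0])]
--     index += len(ciphers[0])
--     for cipher in ciphers:
--         keys[f"key{k}"] = bin_img[index:index+len(cipher)]
--         index += len(cipher)
--         k+=1
--     return keys
-- ===== SOURCE B (Python) =====
-- def find_all_keys_from_img(bin_img: str, ciphers: list[str]) -> list:
--     # stream the string through a single forward character iterator: each field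
--     # consumes its quota of characters; no indices and no slicing anywhere
--     it = iter(bin_img)
--     def take(n):
--         out = []
--         for _ in range(n):
--             ch = next(it, None)
--             if ch is None:
--                 break
--             out.append(ch)
--         return ''.join(out)
--     result = {"iv": take(len(ciphers[0]))}
--     for i, c in enumerate(ciphers, start=1):
--         result[f"key{i}"] = take(len(c))
--     return result
-- ===== Notes on version B (the rewrite author's own statement) =====
-- stated objective: alternative
-- what changed: Replaces A's running-index scan over absolute offsets into bin_img by a streaming consumer: a single forward character iterator from which each field pops its quota of characters (no indices, no slicing), the iv first and then the ciphers via enumerate.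
import Mathlib
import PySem

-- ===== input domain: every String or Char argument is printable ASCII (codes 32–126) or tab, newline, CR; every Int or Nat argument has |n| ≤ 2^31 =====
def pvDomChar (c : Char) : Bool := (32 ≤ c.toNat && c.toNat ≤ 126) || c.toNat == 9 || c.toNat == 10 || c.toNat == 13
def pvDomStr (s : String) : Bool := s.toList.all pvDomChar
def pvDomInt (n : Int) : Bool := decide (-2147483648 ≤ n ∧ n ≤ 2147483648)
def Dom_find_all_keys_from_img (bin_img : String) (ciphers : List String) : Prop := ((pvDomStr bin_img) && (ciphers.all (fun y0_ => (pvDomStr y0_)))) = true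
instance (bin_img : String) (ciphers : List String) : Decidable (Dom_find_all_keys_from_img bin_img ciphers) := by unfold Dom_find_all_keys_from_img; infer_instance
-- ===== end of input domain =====

-- B replaces A's running-index scan by a streaming consumer: one forward character
-- iterator from which each field pops its quota of characters (no index arithmetic,
-- no slicing); objective: alternative, not faster.

-- ===== PORT A =====
-- A's loop: state (keys, index, k); the `none` branch is Python's IndexError on ciphers[0] (outside Pre_).
def find_all_keys_from_img (bin_img : String) (ciphers : List String) : List (String × String) :=
  match PySem.List.pyGet? ciphers 0 with
  | none => []
  | some c0 =>
    let keys : PySem.Dict String String := PySem.Dict.empty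
    let index : Int := 0
    let keys := keys.insert "iv" (PySem.Str.slice bin_img (some index) (some (PySem.Str.len c0)))
    let index := index + PySem.Str.len c0
    let st := ciphers.foldl
      (fun (st : PySem.Dict String String × Int × Int) cipher =>
        (st.1.insert ("key" ++ PySem.Int.toStr st.2.2)
           (PySem.Str.slice bin_img (some st.2.1) (some (st.2.1 + PySem.Str.len cipher))),
         st.2.1 + PySem.Str.len cipher, st.2.2 + 1))
      (keys, index, (1 : Int))
    st.1.items

-- ===== PORT B =====
-- B's take(n): pop up to n characters off the front of the iterator (the remaining char list)
def pvTakeB : List Char → Nat → List Char × List Char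
  | rest, 0 => ([], rest)
  | [], _ + 1 => ([], [])
  | ch :: rs, n + 1 =>
    let p := pvTakeB rs n
    (ch :: p.1, p.2)

def find_all_keys_from_img_alt (bin_img : String) (ciphers : List String) : List (String × String) :=
  match PySem.List.pyGet? ciphers 0 with
  | none => []
  | some c0 =>
    let it := bin_img.toList
    let p0 := pvTakeB it (PySem.Str.len c0).toNat
    let d : PySem.Dict String String := PySem.Dict.empty.insert "iv" (String.ofList p0.1)
    let st := ciphers.foldl
      (fun (st : PySem.Dict String String × List Char × Int) c =>
        let p := pvTakeB st.2.1 (PySem.Str.len c).toNat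
        (st.1.insert ("key" ++ PySem.Int.toStr st.2.2) (String.ofList p.1), p.2, st.2.2 + 1))
      (d, p0.2, 1)
    st.1.items

-- ===== PRECONDITION & SPEC =====
-- Pre_ excludes only the empty ciphers list, on which A raises IndexError at ciphers[0].
def Pre_find_all_keys_from_img (bin_img : String) (ciphers : List String) : Prop := ciphers ≠ []
instance (bin_img : String) (ciphers : List String) : Decidable (Pre_find_all_keys_from_img bin_img ciphers) := by unfold Pre_find_all_keys_from_img; infer_instance
def pvWitness_find_all_keys_from_img : String × List String := ("abcdefgh", ["ab", "xyz"])

def Spec_find_all_keys_from_img (bin_img : String) (ciphers : List String) (out : List (String × String)) : Prop := out = find_all_keys_from_img_alt bin_img ciphers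
instance (bin_img : String) (ciphers : List String) (out : List (String × String)) : Decidable (Spec_find_all_keys_from_img bin_img ciphers out) := by unfold Spec_find_all_keys_from_img; infer_instance

-- ===== CLAIM (what is proved, stated in full; the proofs are below) =====
def Claim_equal_find_all_keys_from_img : Prop := ∀ (bin_img : String) (ciphers : List String), Dom_find_all_keys_from_img bin_img ciphers → Pre_find_all_keys_from_img bin_img ciphers → Spec_find_all_keys_from_img bin_img ciphers (find_all_keys_from_img bin_img ciphers)

-- ===== LEMMAS AND PROOFS =====

-- the (name, segment) pairs produced for the ciphers, starting at offset i with key number k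
def pvSegs (bin_img : String) : List String → Int → Int → List (String × String)
  | [], _, _ => []
  | c :: cs, i, k =>
    ("key" ++ PySem.Int.toStr k, PySem.Str.slice bin_img (some i) (some (i + PySem.Str.len c)))
      :: pvSegs bin_img cs (i + PySem.Str.len c) (k + 1)

-- A's loop inserts exactly the pvSegs pairs, in order
theorem pvA_loop (bin_img : String) (cs : List String)
    (d : PySem.Dict String String) (i k : Int) :
    (cs.foldl
      (fun (st : PySem.Dict String String × Int × Int) cipher =>
        (st.1.insert ("key" ++ PySem.Int.toStr st.2.2)
           (PySem.Str.slice bin_img (some st.2.1) (some (st.2.1 + PySem.Str.len cipher))),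
         st.2.1 + PySem.Str.len cipher, st.2.2 + 1)) (d, i, k)).1
    = (pvSegs bin_img cs i k).foldl (fun d p => d.insert p.1 p.2) d := by
  induction cs generalizing d i k with
  | nil => rfl
  | cons c cs ih =>
    rw [List.foldl_cons]
    dsimp only
    rw [ih]
    rfl

-- pvTakeB is take/drop of the remaining characters
theorem pvTakeB_eq (rest : List Char) (n : Nat) :
    pvTakeB rest n = (rest.take n, rest.drop n) := by
  induction rest generalizing n with
  | nil => cases n <;> rfl
  | cons ch rs ih =>
    cases n with
    | zero => rfl
    | succ n => simp [pvTakeB, ih]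

-- B's loop over ciphers, consuming the iterator from offset i, inserts exactly the pvSegs pairs
theorem pvB_loop (bin_img : String) (cs : List String)
    (d : PySem.Dict String String) (i k : Int) (hi : 0 ≤ i) :
    (cs.foldl
      (fun (st : PySem.Dict String String × List Char × Int) c =>
        let p := pvTakeB st.2.1 (PySem.Str.len c).toNat
        (st.1.insert ("key" ++ PySem.Int.toStr st.2.2) (String.ofList p.1), p.2, st.2.2 + 1))
      (d, bin_img.toList.drop i.toNat, k)).1
    = (pvSegs bin_img cs i k).foldl (fun d p => d.insert p.1 p.2) d := by
  induction cs generalizing d i k with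
  | nil => rfl
  | cons c cs ih =>
    have hlen : (0:Int) ≤ PySem.Str.len c := by
      rw [PySem.Str.len_eq]; positivity
    rw [List.foldl_cons]
    dsimp only
    rw [pvTakeB_eq]
    have hseg : String.ofList ((bin_img.toList.drop i.toNat).take (PySem.Str.len c).toNat)
        = PySem.Str.slice bin_img (some i) (some (i + PySem.Str.len c)) := by
      apply String.toList_inj.mp
      rw [PySem.Str.toList_slice, PySem.Chars.slice_eq_listSlice,
          PySem.List.slice_toNat _ hi (by omega), String.toList_ofList]
      congr 1
      omega
    have hdrop : (bin_img.toList.drop i.toNat).drop (PySem.Str.len c).toNat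
        = bin_img.toList.drop (i + PySem.Str.len c).toNat := by
      rw [List.drop_drop]
      congr 1
      omega
    rw [hseg, hdrop, ih _ _ _ (by omega)]
    rfl

-- ===== VERDICT (by name: the statement is the Claim_ definition above) =====
theorem find_all_keys_from_img_spec : Claim_equal_find_all_keys_from_img := by
  intro bin_img ciphers _hdom hpre
  unfold Spec_find_all_keys_from_img
  unfold Pre_find_all_keys_from_img at hpre
  obtain ⟨c, cs, rfl⟩ : ∃ c cs, ciphers = c :: cs := by
    cases ciphers with
    | nil => exact absurd rfl hpre
    | cons c cs => exact ⟨c, cs, rfl⟩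
  have h0 : PySem.List.pyGet? (c :: cs) (0 : Int) = some c := by
    simp [PySem.List.pyGet?, PySem.List.pyIdx?]
  have hlen : (0:Int) ≤ PySem.Str.len c := by
    rw [PySem.Str.len_eq]; positivity
  unfold find_all_keys_from_img find_all_keys_from_img_alt
  rw [h0]
  dsimp only
  rw [pvA_loop, pvTakeB_eq]
  have hiv : String.ofList (bin_img.toList.take (PySem.Str.len c).toNat)
      = PySem.Str.slice bin_img (some 0) (some (PySem.Str.len c)) := by
    apply String.toList_inj.mp
    rw [PySem.Str.toList_slice, PySem.Chars.slice_eq_listSlice,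
        PySem.List.slice_zero_start, PySem.List.slice_to _ hlen, String.toList_ofList]
  rw [hiv]
  have := pvB_loop bin_img (c :: cs)
    (PySem.Dict.empty.insert "iv" (PySem.Str.slice bin_img (some 0) (some (PySem.Str.len c))))
    (PySem.Str.len c) 1 hlen
  rw [this]
  rw [show (0 : Int) + PySem.Str.len c = PySem.Str.len c by ring]
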